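-- pv_equiv track=rewrite | github.com/mayflower/padv | padv/agents/deepagents_harness.py | _repair_json_like_string
-- ===== SOURCE A (Python) =====
-- def _count_trailing_backslashes(payload: str, pos: int) -> int:
--     """Count consecutive backslashes immediately before *pos* in *payload*."""
--     count = 0
--     j = pos - 1
--     while j >= 0 and payload[j] == "\\":
--         count += 1
--         j -= 1
--     return count
--
-- def _repair_json_escape_at(payload: str, i: int, out: list[str]) -> int:
--     """Handle a backslash-escape inside a JSON string, returning the new index."""
--     nxt = payload[i + 1]
--     if nxt in '"\\/bfnrtu':
--         out.append("\\")
--         out.append(nxt)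
--     elif nxt == "'":
--         out.append("'")
--     else:
--         out.append("\\\\")
--         out.append(nxt)
--     return i + 2
--
-- def _repair_json_like_string(payload: str) -> str:
--     """Fix non-standard escape sequences in a JSON-like string from LLM output."""
--     out: list[str] = []
--     in_string = False
--     i = 0
--     while i < len(payload):
--         char = payload[i]
--         if char == '"':
--             if _count_trailing_backslashes(payload, i) % 2 == 0:
--                 in_string = not in_string
--             out.append(char)
--             i += 1
--             continue
--         if in_string and char == "\\" and i + 1 < len(payload):
--             i = _repair_json_escape_at(payload, i, out)
--             continue
--         out.append(char)
--         i += 1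
--     return "".join(out)
-- ===== SOURCE B (Python) =====
-- # Single forward pass: one char at a time, carrying (in_string, run_odd, pending)
-- # instead of lookahead/backward scans.
-- _VALID = set('"\\/bfnrtu')
--
-- def _repair_json_like_string(payload: str) -> str:
--     out = []
--     in_string = False
--     run_odd = False   # parity of the raw backslash run immediately before the current char
--     pending = False   # inside a string: a '\' was seen; its repair is decided on this char
--     for c in payload:
--         if pending:
--             if c in _VALID:
--                 out.append('\\')
--                 out.append(c)
--             elif c == "'":
--                 out.append("'")
--             else:
--                 out.append('\\\\')
--                 out.append(c)
--             pending = False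
--         elif c == '"':
--             if not run_odd:
--                 in_string = not in_string
--             out.append(c)
--         elif in_string and c == '\\':
--             pending = True
--         else:
--             out.append(c)
--         run_odd = (not run_odd) if c == '\\' else False
--     if pending:
--         out.append('\\')
--     return ''.join(out)
-- ===== Notes on version B (the rewrite author's own statement) =====
-- stated objective: faster
-- what changed: Replaced A's index loop with its backward backslash-scan before each quote and its two-character lookahead escape consumer by a single forward pass over the characters that carries three pieces of state: in_string, the parity of the current raw backslash run, and a pending-backslash flag whose repair is decided on the next character (flushed literally at end of input).
import Mathlib
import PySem

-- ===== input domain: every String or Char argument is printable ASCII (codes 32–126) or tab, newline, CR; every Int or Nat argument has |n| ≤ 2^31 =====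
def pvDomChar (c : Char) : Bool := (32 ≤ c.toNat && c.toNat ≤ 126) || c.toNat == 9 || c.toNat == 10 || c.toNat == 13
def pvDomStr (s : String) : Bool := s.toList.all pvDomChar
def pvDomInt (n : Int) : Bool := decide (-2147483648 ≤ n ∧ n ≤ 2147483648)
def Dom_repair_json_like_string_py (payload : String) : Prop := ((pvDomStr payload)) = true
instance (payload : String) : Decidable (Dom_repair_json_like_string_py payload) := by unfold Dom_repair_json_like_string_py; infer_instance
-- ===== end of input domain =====

-- B replaces A's index loop with backward scans and a two-char lookahead by a single
-- forward pass carrying (in_string, backslash-run parity, pending-backslash) state (measured faster in a timing run).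

-- ===== PORT A =====
-- while j >= 0 and payload[j] == '\\': count += 1; j -= 1   (j is always a valid index when 0 ≤ j)
def pvCtbLoop (payload : List Char) (j : Int) (count : Int) : Int :=
  if h : 0 ≤ j ∧ PySem.List.pyGetD payload j ' ' = '\\' then
    pvCtbLoop payload (j - 1) (count + 1)
  else count
termination_by (j + 1).toNat
decreasing_by omega

def count_trailing_backslashes (payload : List Char) (pos : Int) : Int :=
  pvCtbLoop payload (pos - 1) 0

-- _repair_json_escape_at: caller guarantees i+1 < len, so getD's default is never read
def repair_json_escape_at (payload : List Char) (i : Nat) (out : List Char) : Nat × List Char :=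
  if payload.getD (i + 1) ' ' ∈ ['"', '\\', '/', 'b', 'f', 'n', 'r', 't', 'u'] then
    (i + 2, out ++ ['\\', payload.getD (i + 1) ' '])
  else if payload.getD (i + 1) ' ' = '\'' then (i + 2, out ++ ['\''])
  else (i + 2, out ++ ['\\', '\\', payload.getD (i + 1) ' '])

theorem repair_json_escape_at_fst (payload : List Char) (i : Nat) (out : List Char) :
    (repair_json_escape_at payload i out).1 = i + 2 := by
  unfold repair_json_escape_at; split_ifs <;> rfl

def pvLoopA (payload : List Char) (i : Nat) (in_string : Bool) (out : List Char) : List Char :=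
  if h : i < payload.length then
    let char := payload.getD i ' '
    if char = '"' then
      let in_string' := if PySem.Int.mod (count_trailing_backslashes payload (i : Int)) 2 = 0
                        then !in_string else in_string
      pvLoopA payload (i + 1) in_string' (out ++ [char])
    else if in_string ∧ char = '\\' ∧ i + 1 < payload.length then
      pvLoopA payload (repair_json_escape_at payload i out).1 in_string
        (repair_json_escape_at payload i out).2
    else
      pvLoopA payload (i + 1) in_string (out ++ [char])
  else out
termination_by payload.length - i
decreasing_by
  · omega
  · rw [repair_json_escape_at_fst]; omega
  · omega

def repair_json_like_string_py (payload : String) : String :=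
  String.mk (pvLoopA payload.toList 0 false [])

-- ===== PORT B =====
def pvLoopB : List Char → Bool → Bool → Bool → List Char → List Char
  | [], _, _, pending, out => if pending then out ++ ['\\'] else out
  | c :: rest, in_string, run_odd, pending, out =>
    let run_odd' := if c = '\\' then !run_odd else false
    if pending then
      pvLoopB rest in_string run_odd' false
        (out ++ (if c ∈ ['"', '\\', '/', 'b', 'f', 'n', 'r', 't', 'u'] then ['\\', c]
                 else if c = '\'' then ['\''] else ['\\', '\\', c]))
    else if c = '"' then
      pvLoopB rest (if !run_odd then !in_string else in_string) run_odd' false (out ++ [c])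
    else if in_string ∧ c = '\\' then
      pvLoopB rest in_string run_odd' true out
    else
      pvLoopB rest in_string run_odd' false (out ++ [c])

def repair_json_like_string_py_alt (payload : String) : String :=
  String.mk (pvLoopB payload.toList false false false [])

-- ===== PRECONDITION & SPEC =====
def Spec_repair_json_like_string_py (payload : String) (out : String) : Prop := out = repair_json_like_string_py_alt payload
instance (payload : String) (out : String) : Decidable (Spec_repair_json_like_string_py payload out) := by unfold Spec_repair_json_like_string_py; infer_instance

-- ===== CLAIM (what is proved, stated in full; the proofs are below) =====
def Claim_equal_repair_json_like_string_py : Prop := ∀ (payload : String), Dom_repair_json_like_string_py payload → Spec_repair_json_like_string_py payload (repair_json_like_string_py payload)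

-- ===== LEMMAS AND PROOFS =====
-- number of consecutive backslashes in p immediately before position i
def pvTrail (p : List Char) : Nat → Nat
  | 0 => 0
  | i + 1 => if p.getD i ' ' = '\\' then pvTrail p i + 1 else 0

theorem pvCtbLoop_eq (p : List Char) :
    ∀ (i : Nat) (count : Int), pvCtbLoop p ((i : Int) - 1) count = count + (pvTrail p i : Int) := by
  intro i
  induction i with
  | zero =>
      intro count
      rw [pvCtbLoop]
      simp [pvTrail]
  | succ i ih =>
      intro count
      have hcast : ((i + 1 : Nat) : Int) - 1 = (i : Int) := by push_cast; ring
      rw [pvCtbLoop]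
      simp only [hcast, PySem.List.pyGetD_natCast]
      by_cases hc : p.getD i ' ' = '\\'
      · rw [dif_pos ⟨Int.natCast_nonneg i, hc⟩]
        have := ih (count + 1)
        simp only [pvTrail, hc, if_pos]
        push_cast at this ⊢
        omega
      · have hc' : p[i]?.getD ' ' = '\\' → False := fun h => hc h
        rw [dif_neg (by simp; exact fun h => absurd h hc')]
        simp [pvTrail]
        exact fun h => absurd h hc'

theorem pvCtb_eq (p : List Char) (i : Nat) :
    count_trailing_backslashes p (i : Int) = (pvTrail p i : Int) := by
  unfold count_trailing_backslashes
  have := pvCtbLoop_eq p i 0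
  omega

theorem pvCond_eq (p : List Char) (i : Nat) :
    (PySem.Int.mod (count_trailing_backslashes p (i : Int)) 2 = 0) ↔ (pvTrail p i % 2 = 0) := by
  rw [pvCtb_eq]
  have : PySem.Int.mod ((pvTrail p i : Nat) : Int) ((2 : Nat) : Int) = ((pvTrail p i % 2 : Nat) : Int) :=
    PySem.Int.mod_natCast _ _
  push_cast at this
  rw [this]
  omega

theorem pvParity (c : Char) (t : Nat) :
    (if c = '\\' then !(decide (t % 2 = 1)) else false)
      = decide ((if c = '\\' then t + 1 else 0) % 2 = 1) := by
  by_cases h : c = '\\'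
  · simp only [h, if_pos]
    rcases Nat.mod_two_eq_zero_or_one t with h2 | h2 <;> simp [Nat.add_mod, h2]
  · simp [h]

theorem pvTrail_succ (p : List Char) (i : Nat) (c : Char) (hc : p.getD i ' ' = c) :
    pvTrail p (i + 1) = if c = '\\' then pvTrail p i + 1 else 0 := by
  have hc' : p[i]?.getD ' ' = c := hc
  simp [pvTrail, hc']

theorem pvTrail_succ_parity (p : List Char) (i : Nat) (c : Char) (hc : p.getD i ' ' = c) :
    (if c = '\\' then !(decide (pvTrail p i % 2 = 1)) else false)
      = decide (pvTrail p (i + 1) % 2 = 1) := by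
  rw [pvTrail_succ p i c hc]
  exact pvParity c (pvTrail p i)

theorem pvMain (p : List Char) :
    ∀ (n i : Nat) (in_string : Bool) (out : List Char), p.length - i ≤ n →
      pvLoopA p i in_string out
        = pvLoopB (p.drop i) in_string (decide (pvTrail p i % 2 = 1)) false out := by
  intro n
  induction n with
  | zero =>
      intro i s out hn
      rw [pvLoopA, dif_neg (by omega)]
      rw [List.drop_eq_nil_of_le (by omega)]
      simp [pvLoopB]
  | succ n ih =>
      intro i s out hn
      by_cases hi : i < p.length
      · have hdrop : p.drop i = p[i] :: p.drop (i + 1) := List.drop_eq_getElem_cons hi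
        have hget : p.getD i ' ' = p[i] := List.getD_eq_getElem p ' ' hi
        set c := p[i] with hc
        rw [pvLoopA, dif_pos hi, hget]
        rw [hdrop]
        by_cases hq : c = '"'
        · -- quote: A toggles iff the raw backslash run before i is even; so does B
          rw [if_pos hq]
          have hcond : (PySem.Int.mod (count_trailing_backslashes p (i : Int)) 2 = 0)
              ↔ (pvTrail p i % 2 = 0) := pvCond_eq p i
          have hpar : (if c = '\\' then !(decide (pvTrail p i % 2 = 1)) else false)
              = decide (pvTrail p (i + 1) % 2 = 1) := pvTrail_succ_parity p i c hget
          simp only [pvLoopB, hq] at hpar ⊢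
          rw [hpar]
          by_cases he : pvTrail p i % 2 = 1
          · have hA : ¬ (PySem.Int.mod (count_trailing_backslashes p (i : Int)) 2 = 0) :=
              fun h => by have := hcond.mp h; omega
            have hB : (if (!decide (pvTrail p i % 2 = 1)) = true then !s else s) = s := by
              simp [he]
            rw [if_neg hA, if_pos trivial, hB, ih (i + 1) _ _ (by omega), if_neg Bool.false_ne_true]
          · have hA : PySem.Int.mod (count_trailing_backslashes p (i : Int)) 2 = 0 :=
              hcond.mpr (by omega)
            have hB : (if (!decide (pvTrail p i % 2 = 1)) = true then !s else s) = !s := by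
              simp [he]
            rw [if_pos hA, if_pos trivial, hB, ih (i + 1) _ _ (by omega), if_neg Bool.false_ne_true]
        · by_cases hesc : s = true ∧ c = '\\' ∧ i + 1 < p.length
          · -- escape: A consumes two characters, B takes two steps (pending, then repair)
            rw [if_neg hq, if_pos hesc]
            obtain ⟨hs, hbs, hlt⟩ := hesc
            have hdrop2 : p.drop (i + 1) = p[i + 1] :: p.drop (i + 2) :=
              List.drop_eq_getElem_cons hlt
            set nxt := p[i + 1] with hnxt
            have hget2 : p.getD (i + 1) ' ' = nxt := List.getD_eq_getElem p ' ' hlt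
            conv_rhs => rw [pvLoopB]
            rw [if_neg (by simp), if_neg (by simp [hbs]), if_pos ⟨by simp [hs], hbs⟩]
            rw [hdrop2]
            conv_rhs => rw [pvLoopB]
            rw [if_pos rfl]
            have hpar1 : (if c = '\\' then !(decide (pvTrail p i % 2 = 1)) else false)
                = decide (pvTrail p (i + 1) % 2 = 1) := pvTrail_succ_parity p i c hget
            have hpar2 : (if nxt = '\\' then !(decide (pvTrail p (i + 1) % 2 = 1)) else false)
                = decide (pvTrail p (i + 2) % 2 = 1) := pvTrail_succ_parity p (i + 1) nxt hget2
            rw [hpar1, hpar2, repair_json_escape_at_fst]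
            rw [ih (i + 2) _ _ (by omega)]
            congr 1
            -- the appended repair is the same in both ports
            unfold repair_json_escape_at
            rw [hget2]
            split_ifs <;> rfl
          · -- plain character (including a trailing backslash inside a string)
            rw [if_neg hq, if_neg hesc]
            by_cases hp : s = true ∧ c = '\\'
            · -- c = '\\' inside a string but i+1 = length: B flushes the pending backslash
              obtain ⟨hs, hbs⟩ := hp
              have hend : i + 1 = p.length := by
                rcases Nat.lt_or_ge (i + 1) p.length with h | h
                · exact absurd ⟨hs, hbs, h⟩ hesc
                · omega
              simp only [pvLoopB]
              rw [if_neg (by simp), if_neg (by simp [hbs]), if_pos ⟨by simp [hs], hbs⟩]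
              rw [List.drop_eq_nil_of_le (by omega)]
              rw [pvLoopA, dif_neg (by omega)]
              simp [pvLoopB, hbs]
            · rw [ih (i + 1) _ _ (by omega), ← pvTrail_succ_parity p i c hget]
              simp only [pvLoopB]
              rw [if_neg Bool.false_ne_true, if_neg hq, if_neg hp]
      · rw [pvLoopA, dif_neg hi]
        rw [List.drop_eq_nil_of_le (by omega)]
        simp [pvLoopB]

-- ===== VERDICT (by name: the statement is the Claim_ definition above) =====
theorem repair_json_like_string_py_spec : Claim_equal_repair_json_like_string_py := by
  intro payload _
  unfold Spec_repair_json_like_string_py repair_json_like_string_py repair_json_like_string_py_alt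
  congr 1
  have := pvMain payload.toList payload.toList.length 0 false [] (by omega)
  simpa [pvTrail] using this
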